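-- pv_equiv track=rewrite | github.com/natejswenson/advent-of-code | 2025/06/06.02.py | count_fresh_ids
-- ===== SOURCE A (Python) =====
-- def count_fresh_ids(ranges):
--     if not ranges:
--         return 0
--
--     # Sort ranges by starting value
--     ranges.sort()
--
--     total = 0
--     current_start, current_end = ranges[0]
--
--     for start, end in ranges[1:]:
--         if start <= current_end + 1:
--             # Overlapping or adjacent range
--             current_end = max(current_end, end)
--         else:
--             # Disjoint range
--             total += current_end - current_start + 1
--             current_start, current_end = start, end
--
--     # Add final range
--     total += current_end - current_start + 1
--     return total
-- ===== SOURCE B (Python) =====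
-- def count_fresh_ids(ranges):
--     if not ranges:
--         return 0
--
--     ranges.sort()
--
--     # Pass 1: running-maximum table: himax[i] = max end among ranges[0..i].
--     himax = [e for _, e in ranges]
--     for i in range(1, len(himax)):
--         if himax[i - 1] > himax[i]:
--             himax[i] = himax[i - 1]
--
--     # Pass 2: each range adds only its marginal (previously uncovered) part,
--     # judged against the running maximum of everything before it; no interval
--     # merging state is kept.
--     total = ranges[0][1] - ranges[0][0] + 1
--     for (s, e), hi in zip(ranges[1:], himax):
--         if s > hi + 1:
--             total += e - s + 1
--         elif e > hi:
--             total += e - hi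
--     return total
-- ===== Notes on version B (the rewrite author's own statement) =====
-- stated objective: alternative
-- what changed: B keeps no merged-interval state at all: a first pass precomputes a running-maximum-of-ends table, and a second pass sums each range's marginal (previously uncovered) contribution by clipping it against that table, instead of A's stateful merge of a current interval.
import Mathlib
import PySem

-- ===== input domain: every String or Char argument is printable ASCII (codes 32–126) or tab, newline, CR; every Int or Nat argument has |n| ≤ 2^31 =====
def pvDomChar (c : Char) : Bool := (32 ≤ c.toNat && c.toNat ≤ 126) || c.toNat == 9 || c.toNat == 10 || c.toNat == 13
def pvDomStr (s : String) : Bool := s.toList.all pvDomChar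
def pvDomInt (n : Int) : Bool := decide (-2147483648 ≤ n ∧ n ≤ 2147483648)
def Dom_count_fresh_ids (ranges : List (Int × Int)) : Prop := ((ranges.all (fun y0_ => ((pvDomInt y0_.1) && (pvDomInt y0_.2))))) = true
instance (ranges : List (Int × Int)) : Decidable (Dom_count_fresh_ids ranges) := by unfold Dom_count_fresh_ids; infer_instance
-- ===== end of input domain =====

-- B replaces A's stateful merge of a current interval by two staged passes (a
-- running-maximum-of-ends table, then a sum of each range's clipped marginal
-- contribution); equivalence is about the return value — both sort the argument
-- in place in Python.

-- ===== PORT A =====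
-- A's loop over ranges[1:], state (total, current_start, current_end)
def stepA (st : Int × Int × Int) (p : Int × Int) : Int × Int × Int :=
  if p.1 ≤ st.2.2 + 1 then (st.1, st.2.1, max st.2.2 p.2)
  else (st.1 + st.2.2 - st.2.1 + 1, p.1, p.2)

def count_fresh_ids (ranges : List (Int × Int)) : Int :=
  if ranges = [] then 0
  else
    match PySem.List.sorted2 ranges (fun p => p.1) (fun p => p.2) with
    | [] => 0  -- unreachable: sorted2 of a nonempty list is nonempty
    | (cs, ce) :: rest =>
      let st := rest.foldl stepA (0, cs, ce)
      st.1 + st.2.2 - st.2.1 + 1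

-- ===== PORT B =====
-- Source B pass 1: himax[i] = max(himax[i-1], ends[i]); this builds the tail given
-- the previous running maximum
def prefMaxFrom (prev : Int) : List Int → List Int
  | [] => []
  | e :: es => (if prev > e then prev else e) :: prefMaxFrom (if prev > e then prev else e) es

-- Source B pass 2 body: marginal contribution of one zipped pair ((s, e), hi)
def stepB (t : Int) (q : (Int × Int) × Int) : Int :=
  if q.2 + 1 < q.1.1 then t + q.1.2 - q.1.1 + 1
  else if q.2 < q.1.2 then t + q.1.2 - q.2
  else t

def count_fresh_ids_alt (ranges : List (Int × Int)) : Int :=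
  if ranges = [] then 0
  else
    match PySem.List.sorted2 ranges (fun p => p.1) (fun p => p.2) with
    | [] => 0  -- unreachable
    | (cs, ce) :: rest =>
      let himax := ce :: prefMaxFrom ce (rest.map (fun p => p.2))
      (rest.zip himax).foldl stepB (ce - cs + 1)

-- ===== PRECONDITION & SPEC =====
def Spec_count_fresh_ids (ranges : List (Int × Int)) (out : Int) : Prop := out = count_fresh_ids_alt ranges
instance (ranges : List (Int × Int)) (out : Int) : Decidable (Spec_count_fresh_ids ranges out) := by unfold Spec_count_fresh_ids; infer_instance

-- ===== CLAIM (what is proved, stated in full; the proofs are below) =====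
def Claim_equal_count_fresh_ids : Prop := ∀ (ranges : List (Int × Int)), Dom_count_fresh_ids ranges → Spec_count_fresh_ids ranges (count_fresh_ids ranges)

-- ===== LEMMAS AND PROOFS =====

-- the strict lexicographic comparison sorted2 uses on (fst, snd)
def lt2 (a b : Int × Int) : Bool :=
  decide (a.1 < b.1) || (!decide (b.1 < a.1) && decide (a.2 < b.2))

lemma lt2_false_trans {a b c : Int × Int} (h1 : lt2 b a = false) (h2 : lt2 c b = false) :
    lt2 c a = false := by
  simp only [lt2, Bool.or_eq_false_iff, Bool.and_eq_false_iff, decide_eq_false_iff_not,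
    Bool.not_eq_false', decide_eq_true_eq] at *
  omega

lemma lt2_asymm {a b : Int × Int} (h : lt2 a b = true) : lt2 b a = false := by
  simp only [lt2, Bool.or_eq_true, Bool.and_eq_true, Bool.or_eq_false_iff, Bool.and_eq_false_iff,
    decide_eq_false_iff_not, Bool.not_eq_true', decide_eq_false_iff_not,
    Bool.not_eq_false', decide_eq_true_eq] at *
  omega

lemma pairwise_insertBy (x : Int × Int) (l : List (Int × Int))
    (h : l.Pairwise (fun a b => lt2 b a = false)) :
    (PySem.List.insertBy lt2 x l).Pairwise (fun a b => lt2 b a = false) := by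
  induction l with
  | nil => simp [PySem.List.insertBy]
  | cons y ys ih =>
    rcases List.pairwise_cons.mp h with ⟨hy, hys⟩
    by_cases hb : lt2 x y = true
    · simp only [PySem.List.insertBy, hb, if_pos]
      refine List.pairwise_cons.mpr ⟨?_, h⟩
      intro z hz
      rcases List.mem_cons.mp hz with rfl | hz
      · exact lt2_asymm hb
      · exact lt2_false_trans (lt2_asymm hb) (hy z hz)
    · have hb' : lt2 x y = false := by revert hb; cases lt2 x y <;> simp
      simp only [PySem.List.insertBy, hb']
      refine List.pairwise_cons.mpr ⟨?_, ih hys⟩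
      intro z hz
      rcases (PySem.List.mem_insertBy lt2 x z ys).mp hz with rfl | hz
      · exact hb'
      · exact hy z hz

lemma pairwise_foldl_insertBy (xs acc : List (Int × Int))
    (h : acc.Pairwise (fun a b => lt2 b a = false)) :
    (xs.foldl (fun acc x => PySem.List.insertBy lt2 x acc) acc).Pairwise
      (fun a b => lt2 b a = false) := by
  induction xs generalizing acc with
  | nil => exact h
  | cons x xs ih => exact ih _ (pairwise_insertBy x acc h)

-- sorted2 on (fst, snd) has nondecreasing first components
lemma sorted2_pairwise_fst (xs : List (Int × Int)) :
    (PySem.List.sorted2 xs (fun p => p.1) (fun p => p.2)).Pairwise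
      (fun a b => a.1 ≤ b.1) := by
  have h : (PySem.List.sorted2 xs (fun p => p.1) (fun p => p.2)).Pairwise
      (fun a b => lt2 b a = false) := by
    have he : PySem.List.sorted2 xs (fun p => p.1) (fun p => p.2) =
        xs.foldl (fun acc x => PySem.List.insertBy lt2 x acc) [] := rfl
    rw [he]
    exact pairwise_foldl_insertBy xs [] (by simp)
  refine h.imp ?_
  intro a b hab
  simp only [lt2, Bool.or_eq_false_iff, Bool.and_eq_false_iff, decide_eq_false_iff_not,
    Bool.not_eq_false', decide_eq_true_eq] at hab
  omega

lemma if_gt_eq_max (a b : Int) : (if a > b then a else b) = max a b := by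
  split_ifs <;> omega

-- A's accumulator is additive: the fold's total starting from a is a plus the
-- total starting from 0, with the same final interval
lemma foldA_shift (r : List (Int × Int)) : ∀ (a cs ce : Int),
    r.foldl stepA (a, cs, ce)
      = (a + (r.foldl stepA (0, cs, ce)).1, (r.foldl stepA (0, cs, ce)).2) := by
  induction r with
  | nil => intro a cs ce; simp
  | cons p r ih =>
    intro a cs ce
    by_cases h : p.1 ≤ ce + 1
    · simp only [List.foldl_cons, stepA, if_pos h]
      exact ih a cs (max ce p.2)
    · simp only [List.foldl_cons, stepA, if_neg h]
      rw [ih (a + ce - cs + 1) p.1 p.2, ih (0 + ce - cs + 1) p.1 p.2]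
      simp only [Prod.mk.injEq]
      exact ⟨by ring, trivial⟩

-- the simultaneous invariant: B's clipped-contribution sweep from the running
-- maximum max P0 ce equals A's remaining merge total, up to the open interval
lemma loop_rel (r : List (Int × Int)) : ∀ (t cs ce P0 : Int),
    r.Pairwise (fun a b => a.1 ≤ b.1) → (∀ p ∈ r, cs ≤ p.1) → (P0 ≤ ce ∨ P0 + 1 < cs) →
    (r.zip (max P0 ce :: prefMaxFrom (max P0 ce) (r.map (fun p => p.2)))).foldl stepB t
      = t + (r.foldl stepA (0, cs, ce)).1
          + (r.foldl stepA (0, cs, ce)).2.2 - (r.foldl stepA (0, cs, ce)).2.1 - ce + cs := by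
  induction r with
  | nil => intro t cs ce P0 _ _ _; simp; omega
  | cons p r ih =>
    intro t cs ce P0 hpw hcs hP0
    rcases List.pairwise_cons.mp hpw with ⟨hhd, htl⟩
    have hcs_p : cs ≤ p.1 := hcs p (List.mem_cons_self ..)
    by_cases hle : p.1 ≤ ce + 1
    · -- A merges; B's contribution is the growth of the running maximum
      have hPce : P0 ≤ ce := by rcases hP0 with h | h <;> omega
      have hmax : max P0 ce = ce := max_eq_right hPce
      have hBneg : ¬ (max P0 ce + 1 < p.1) := by omega
      simp only [List.map_cons, prefMaxFrom, if_gt_eq_max, List.zip_cons_cons,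
        List.foldl_cons, stepA, if_pos hle, stepB, if_neg hBneg]
      rw [hmax]
      have hIH := ih (if ce < p.2 then t + p.2 - ce else t) cs (max ce p.2) ce htl
        (fun q hq => hcs q (List.mem_cons_of_mem _ hq)) (Or.inl (le_max_left ..))
      rw [max_eq_right (le_max_left ce p.2)] at hIH
      rw [hIH]
      split_ifs with h <;> omega
    · -- A closes the interval; B counts the new range in full
      have hB : max P0 ce + 1 < p.1 := by
        rcases hP0 with h | h
        · have : max P0 ce = ce := max_eq_right h; omega
        · have := max_le (by omega : P0 ≤ p.1 - 2) (by omega : ce ≤ p.1 - 2); omega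
      simp only [List.map_cons, prefMaxFrom, if_gt_eq_max, List.zip_cons_cons,
        List.foldl_cons, stepA, if_neg (by omega : ¬ p.1 ≤ ce + 1), stepB, if_pos hB]
      rw [ih (t + p.2 - p.1 + 1) p.1 p.2 (max P0 ce) htl hhd (Or.inr hB),
        foldA_shift r (0 + ce - cs + 1) p.1 p.2]
      simp
      omega

-- ===== VERDICT (by name: the statement is the Claim_ definition above) =====
theorem count_fresh_ids_spec : Claim_equal_count_fresh_ids := by
  intro ranges _
  unfold Spec_count_fresh_ids count_fresh_ids count_fresh_ids_alt
  by_cases hnil : ranges = []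
  · simp [hnil]
  · simp only [hnil, if_false]
    have hpw := sorted2_pairwise_fst ranges
    cases hs : PySem.List.sorted2 ranges (fun p => p.1) (fun p => p.2) with
    | nil => rfl
    | cons hd rest =>
      obtain ⟨cs, ce⟩ := hd
      rw [hs] at hpw
      rcases List.pairwise_cons.mp hpw with ⟨hhd, htl⟩
      have := loop_rel rest (ce - cs + 1) cs ce ce htl hhd (Or.inl le_rfl)
      rw [max_self] at this
      simp only [this]
      ring
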